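-- pv_equiv track=rewrite | github.com/francescomontagna/naqanet | setup_drop.py | find_valid_spans
-- ===== SOURCE A (Python) =====
-- import string
-- from collections import defaultdict
-- from typing import Dict, List, Union, Tuple, Any
--
-- IGNORED_TOKENS = {"a", "an", "the"}
--
-- STRIPPED_CHARACTERS = string.punctuation + "".join(["‘", "’", "´", "`", "_"])
--
-- def find_valid_spans(
--     passage_tokens: List[str], answer_texts: List[str] # answer texts = tokenized and recomposed answer texts
-- ) -> List[Tuple[int, int]]:
--     normalized_tokens = [
--         token.lower().strip(STRIPPED_CHARACTERS) for token in passage_tokens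
--     ]
--     word_positions: Dict[str, List[int]] = defaultdict(list) # ?
--     for i, token in enumerate(normalized_tokens):
--         word_positions[token].append(i) # dict telling index at which appears each word in the passage
--
--     spans = []
--     for answer_text in answer_texts:
--         answer_tokens = answer_text.lower().strip(STRIPPED_CHARACTERS).split()
--         num_answer_tokens = len(answer_tokens)
--         if answer_tokens[0] not in word_positions:
--             continue
--         for span_start in word_positions[answer_tokens[0]]:
--             span_end = span_start  # span_end is _inclusive_
--             answer_index = 1
--             while answer_index < num_answer_tokens and span_end + 1 < len(normalized_tokens):
--                 token = normalized_tokens[span_end + 1]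
--                 if answer_tokens[answer_index].strip(STRIPPED_CHARACTERS) == token:
--                     answer_index += 1
--                     span_end += 1
--                 elif token in IGNORED_TOKENS:
--                     span_end += 1
--                 else:
--                     break
--             if num_answer_tokens == answer_index: # if I found as many consecutive match as I expected, this is a matching passage
--                 spans.append((span_start, span_end))
--     return spans # list of all matching passage slices
-- ===== SOURCE B (Python) =====
-- import string
--
-- IGNORED_TOKENS = {"a", "an", "the"}
--
-- STRIPPED_CHARACTERS = string.punctuation + "".join(["‘", "’", "´", "`", "_"])
--
--
-- def _extend(norm, j, rest):
--     # Recursively consume `rest` (already re-stripped answer tokens) starting at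
--     # passage index j; returns the inclusive end index of the match, or None.
--     if not rest:
--         return j - 1
--     if j == len(norm):
--         return None
--     if rest[0] == norm[j]:
--         return _extend(norm, j + 1, rest[1:])
--     if norm[j] in IGNORED_TOKENS:
--         return _extend(norm, j + 1, rest)
--     return None
--
--
-- def find_valid_spans(passage_tokens, answer_texts):
--     norm = [t.lower().strip(STRIPPED_CHARACTERS) for t in passage_tokens]
--     spans = []
--     for answer_text in answer_texts:
--         first, *rest = answer_text.lower().strip(STRIPPED_CHARACTERS).split()
--         tail = [t.strip(STRIPPED_CHARACTERS) for t in rest]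
--         for i, tok in enumerate(norm):
--             if tok == first:
--                 end = _extend(norm, i + 1, tail)
--                 if end is not None:
--                     spans.append((i, end))
--     return spans
-- ===== Notes on version B (the rewrite author's own statement) =====
-- stated objective: simpler
-- what changed: Drops the defaultdict inverted index and replaces A's two-counter (span_end, answer_index) while-loop by a recursive descent that consumes the pre-stripped remaining answer-token list along the passage suffix, appending a span at each flat-scan hit of the first token; same append order by increasing start per answer.
import Mathlib
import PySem

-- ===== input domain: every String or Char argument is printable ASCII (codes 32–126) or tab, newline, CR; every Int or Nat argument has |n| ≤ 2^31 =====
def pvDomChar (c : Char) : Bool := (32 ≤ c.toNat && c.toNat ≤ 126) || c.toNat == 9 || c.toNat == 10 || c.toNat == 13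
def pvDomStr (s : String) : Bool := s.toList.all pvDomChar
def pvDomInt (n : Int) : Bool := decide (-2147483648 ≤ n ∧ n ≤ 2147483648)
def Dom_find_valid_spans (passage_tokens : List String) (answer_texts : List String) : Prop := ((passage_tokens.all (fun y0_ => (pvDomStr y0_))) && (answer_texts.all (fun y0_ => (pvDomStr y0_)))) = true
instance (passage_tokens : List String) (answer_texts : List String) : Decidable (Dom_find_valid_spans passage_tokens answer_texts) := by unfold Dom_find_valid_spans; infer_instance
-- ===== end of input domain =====

-- B drops A's defaultdict inverted index and replaces the two-counter while-loop by a
-- recursive descent on the pre-stripped remaining answer-token list (simpler; not claimed faster).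

-- shared module constants (IGNORED_TOKENS, STRIPPED_CHARACTERS) and the common
-- normalization token.lower().strip(STRIPPED_CHARACTERS), used by both Pythons
def pvIgnored : List String := ["a", "an", "the"]
def pvStripped : String := "!\"#$%&'()*+,-./:;<=>?@[\\]^_`{|}~‘’´`_"
def pvNormalize (t : String) : String := PySem.Str.stripChars (PySem.Str.lower t) pvStripped

-- ===== PORT A =====
-- A's inner while loop (state: span_end, answer_index); indices are the Nat positions of the passage
def whileA (norm ans : List String) (spanEnd ansIdx : Nat) : Nat × Nat :=
  if h : ansIdx < ans.length ∧ spanEnd + 1 < norm.length then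
    -- token = normalized_tokens[span_end + 1] (inlined)
    if PySem.Str.stripChars (ans[ansIdx]'h.1) pvStripped == norm[spanEnd + 1]'h.2 then
      whileA norm ans (spanEnd + 1) (ansIdx + 1)
    else if pvIgnored.contains (norm[spanEnd + 1]'h.2) then
      whileA norm ans (spanEnd + 1) ansIdx
    else (spanEnd, ansIdx)
  else (spanEnd, ansIdx)
termination_by norm.length - spanEnd
decreasing_by all_goals omega

def find_valid_spans (passage_tokens : List String) (answer_texts : List String) : List (Int × Int) :=
  let normalized := passage_tokens.map pvNormalize
  let word_positions : PySem.Dict String (List Nat) :=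
    normalized.zipIdx.foldl (fun d p => d.insert p.1 (d.getD p.1 [] ++ [p.2])) PySem.Dict.empty
  answer_texts.foldl (fun spans answer_text =>
    let answer_tokens := PySem.Str.split₀ (pvNormalize answer_text)
    match answer_tokens with
    | [] => spans   -- Python raises IndexError here; excluded by Pre_
    | a0 :: _ =>
      match word_positions.get? a0 with
      | none => spans
      | some positions =>
        positions.foldl (fun sp span_start =>
          let r := whileA normalized answer_tokens span_start 1
          if answer_tokens.length == r.2 then sp ++ [((span_start : Int), (r.1 : Int))] else sp)
          spans) []

-- ===== PORT B =====
-- Source B's _extend helper: recursion on the remaining (pre-stripped) answer tokens along the passage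
def extendB (norm : List String) (j : Nat) (rest : List String) : Option Nat :=
  match rest with
  | [] => some (j - 1)
  | r :: rs =>
    if h : j < norm.length then
      if r == norm[j]'h then extendB norm (j + 1) rs
      else if pvIgnored.contains (norm[j]'h) then extendB norm (j + 1) (r :: rs)
      else none
    else none
termination_by norm.length - j
decreasing_by all_goals omega

def find_valid_spans_alt (passage_tokens : List String) (answer_texts : List String) : List (Int × Int) :=
  let norm := passage_tokens.map pvNormalize
  answer_texts.foldl (fun spans answer_text =>
    match PySem.Str.split₀ (pvNormalize answer_text) with
    | [] => spans   -- Python raises ValueError here; excluded by Pre_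
    | first :: rest =>
      let tail := rest.map (fun t => PySem.Str.stripChars t pvStripped)
      norm.zipIdx.foldl (fun sp p =>
        if p.1 == first then
          match extendB norm (p.2 + 1) tail with
          | some e => sp ++ [((p.2 : Int), (e : Int))]
          | none => sp
        else sp) spans) []

-- ===== PRECONDITION & SPEC =====
-- Pre_ excludes answer texts that normalize to no tokens (answer_tokens == []),
-- on which Python A raises IndexError at answer_tokens[0] (B's unpacking raises there too).
def Pre_find_valid_spans (_passage_tokens : List String) (answer_texts : List String) : Prop :=
  ∀ t ∈ answer_texts, PySem.Str.split₀ (pvNormalize t) ≠ []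
instance (passage_tokens : List String) (answer_texts : List String) : Decidable (Pre_find_valid_spans passage_tokens answer_texts) := by unfold Pre_find_valid_spans; infer_instance

def pvWitness_find_valid_spans : List String × List String := (["The", "cat.", "sat"], ["the cat", "sat"])

def Spec_find_valid_spans (passage_tokens : List String) (answer_texts : List String) (out : List (Int × Int)) : Prop := out = find_valid_spans_alt passage_tokens answer_texts
instance (passage_tokens : List String) (answer_texts : List String) (out : List (Int × Int)) : Decidable (Spec_find_valid_spans passage_tokens answer_texts out) := by unfold Spec_find_valid_spans; infer_instance

-- ===== CLAIM (what is proved, stated in full; the proofs are below) =====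
def Claim_equal_find_valid_spans : Prop := ∀ (passage_tokens : List String) (answer_texts : List String), Dom_find_valid_spans passage_tokens answer_texts → Pre_find_valid_spans passage_tokens answer_texts → Spec_find_valid_spans passage_tokens answer_texts (find_valid_spans passage_tokens answer_texts)

-- ===== LEMMAS AND PROOFS =====

-- B's recursive descent computes exactly A's while-loop verdict
theorem extendB_eq_whileA (norm ans : List String) (spanEnd ansIdx : Nat) :
    ansIdx ≤ ans.length →
    extendB norm (spanEnd + 1) ((ans.drop ansIdx).map (fun t => PySem.Str.stripChars t pvStripped)) =
      (let r := whileA norm ans spanEnd ansIdx;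
       if ans.length == r.2 then some r.1 else none) := by
  fun_induction whileA norm ans spanEnd ansIdx with
  | case1 se ai h heq ih =>
    intro hle
    have hd : ans.drop ai = ans[ai] :: ans.drop (ai + 1) := List.drop_eq_getElem_cons h.1
    rw [hd]
    simp only [List.map_cons]
    rw [extendB, dif_pos h.2, if_pos heq]
    exact ih h.1
  | case2 se ai h heq hig ih =>
    intro hle
    have hd : ans.drop ai = ans[ai] :: ans.drop (ai + 1) := List.drop_eq_getElem_cons h.1
    rw [hd]
    simp only [List.map_cons]
    rw [extendB, dif_pos h.2, if_neg heq, if_pos hig]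
    have h2 := ih hle
    rw [hd] at h2
    simp only [List.map_cons] at h2
    exact h2
  | case3 se ai h heq hig =>
    intro _
    have hd : ans.drop ai = ans[ai] :: ans.drop (ai + 1) := List.drop_eq_getElem_cons h.1
    rw [hd]
    simp only [List.map_cons]
    rw [extendB, dif_pos h.2, if_neg heq, if_neg hig]
    have : ¬ (ans.length == ai) = true := by simp; omega
    simp [this]
  | case4 se ai h =>
    intro hle
    rcases Nat.lt_or_ge ai ans.length with hlt | hge
    · -- then se+1 ≥ norm.length
      have hn : ¬ se + 1 < norm.length := fun hc => h ⟨hlt, hc⟩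
      have hd : ans.drop ai = ans[ai] :: ans.drop (ai + 1) := List.drop_eq_getElem_cons hlt
      rw [hd]
      simp only [List.map_cons]
      rw [extendB, dif_neg hn]
      have : ¬ (ans.length == ai) = true := by simp; omega
      simp [this]
    · have hai : ai = ans.length := le_antisymm hle hge
      subst hai
      simp [extendB]

-- the two per-position bodies agree (ans nonempty, tail = stripped drop 1)
theorem body_eq (norm : List String) (a0 : String) (rest : List String) (sp : List (Int × Int)) (i : Nat) :
    (let r := whileA norm (a0 :: rest) i 1;
     if (a0 :: rest).length == r.2 then sp ++ [((i : Int), (r.1 : Int))] else sp) =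
    (match extendB norm (i + 1) (rest.map (fun t => PySem.Str.stripChars t pvStripped)) with
     | some e => sp ++ [((i : Int), (e : Int))]
     | none => sp) := by
  have h := extendB_eq_whileA norm (a0 :: rest) i 1 (by simp)
  simp only [List.drop_one, List.tail_cons] at h
  rw [h]
  rcases hr : whileA norm (a0 :: rest) i 1 with ⟨se, ai⟩
  simp only [List.length_cons] at *
  by_cases he : rest.length + 1 = ai
  · simp [he]
  · simp [he]

-- the defaultdict built by A: lookup of k yields exactly the positions whose token equals k
theorem wp_getD (ps : List (String × Nat)) (d : PySem.Dict String (List Nat)) (k : String) :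
    (ps.foldl (fun d p => d.insert p.1 (d.getD p.1 [] ++ [p.2])) d).getD k [] =
      d.getD k [] ++ (ps.filter (fun p => p.1 == k)).map (·.2) := by
  induction ps generalizing d with
  | nil => simp
  | cons p ps ih =>
    simp only [List.foldl_cons, ih]
    by_cases hk : p.1 = k
    · subst hk
      simp [PySem.Dict.getD_insert_self]
    · rw [PySem.Dict.getD_insert_of_ne _ _ _ (Ne.symm hk)]
      simp [hk]

theorem wp_get?_none (ps : List (String × Nat)) (d : PySem.Dict String (List Nat)) (k : String) :
    ((ps.foldl (fun d p => d.insert p.1 (d.getD p.1 [] ++ [p.2])) d).get? k = none ↔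
      d.get? k = none ∧ ps.filter (fun p => p.1 == k) = []) := by
  induction ps generalizing d with
  | nil => simp
  | cons p ps ih =>
    simp only [List.foldl_cons, ih]
    by_cases hk : p.1 = k
    · subst hk
      simp [PySem.Dict.get?_insert_self]
    · rw [PySem.Dict.get?_insert_of_ne _ _ (Ne.symm hk)]
      simp [hk]

-- per answer_text: A's fold over word_positions[a0] equals B's guarded flat scan
theorem per_answer (norm : List String) (a0 : String) (rest : List String)
    (spans : List (Int × Int)) :
    (match (norm.zipIdx.foldl (fun d p => d.insert p.1 (d.getD p.1 [] ++ [p.2]))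
              (PySem.Dict.empty : PySem.Dict String (List Nat))).get? a0 with
     | none => spans
     | some positions =>
       positions.foldl (fun sp span_start =>
         let r := whileA norm (a0 :: rest) span_start 1
         if (a0 :: rest).length == r.2 then sp ++ [((span_start : Int), (r.1 : Int))] else sp) spans) =
    norm.zipIdx.foldl (fun sp p =>
      if p.1 == a0 then
        match extendB norm (p.2 + 1) (rest.map (fun t => PySem.Str.stripChars t pvStripped)) with
        | some e => sp ++ [((p.2 : Int), (e : Int))]
        | none => sp
      else sp) spans := by
  have hB : norm.zipIdx.foldl (fun sp p =>
      if p.1 == a0 then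
        match extendB norm (p.2 + 1) (rest.map (fun t => PySem.Str.stripChars t pvStripped)) with
        | some e => sp ++ [((p.2 : Int), (e : Int))]
        | none => sp
      else sp) spans =
      ((norm.zipIdx.filter (fun p => p.1 == a0)).map (·.2)).foldl
        (fun sp i => match extendB norm (i + 1) (rest.map (fun t => PySem.Str.stripChars t pvStripped)) with
         | some e => sp ++ [((i : Int), (e : Int))]
         | none => sp) spans := by
    rw [List.foldl_map, List.foldl_filter]
  rw [hB]
  cases hget : (norm.zipIdx.foldl (fun d p => d.insert p.1 (d.getD p.1 [] ++ [p.2]))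
      (PySem.Dict.empty : PySem.Dict String (List Nat))).get? a0 with
  | none =>
    have := (wp_get?_none norm.zipIdx PySem.Dict.empty a0).mp hget
    rw [this.2]
    simp
  | some positions =>
    have hgd : (norm.zipIdx.foldl (fun d p => d.insert p.1 (d.getD p.1 [] ++ [p.2]))
        (PySem.Dict.empty : PySem.Dict String (List Nat))).getD a0 [] = positions :=
      PySem.Dict.getD_of_get?_eq_some _ [] hget
    rw [wp_getD] at hgd
    simp only [PySem.Dict.getD_empty] at hgd
    rw [← hgd]
    simp only [List.nil_append]
    exact PySem.List.foldl_congr_mem _ _ _ _ (fun sp i _ => body_eq norm a0 rest sp i)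

-- ===== VERDICT (by name: the statement is the Claim_ definition above) =====
theorem find_valid_spans_spec : Claim_equal_find_valid_spans := by
  intro passage_tokens answer_texts _hdom _hpre
  unfold Spec_find_valid_spans find_valid_spans find_valid_spans_alt
  apply PySem.List.foldl_congr_mem
  intro spans answer_text _hmem
  cases hsp : PySem.Str.split₀ (pvNormalize answer_text) with
  | nil => rfl
  | cons a0 rest =>
    exact per_answer (passage_tokens.map pvNormalize) a0 rest spans
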